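-- pv_equiv track=rewrite | github.com/NiccoloBurrinii/Python-Data-Structures-and-Logic-Labs | es2.py | parola_piu_lunga
-- ===== SOURCE A (Python) =====
-- def parola_piu_lunga (testo):
--     parole = testo.split()
--     parola_lunga = max(parole, key=len)
--     count = 0
--
--     for parola in parole:
--         if parola_lunga == parola:
--             count+=1
--
--     return parola_lunga, count
-- ===== SOURCE B (Python) =====
-- def parola_piu_lunga(testo):
--     best = None
--     count = 0
--     for parola in testo.split():
--         if best is None or len(parola) > len(best):
--             best = parola
--             count = 1
--         elif parola == best:
--             count += 1
--     if best is None: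
--         raise ValueError("max() arg is an empty sequence")
--     return best, count
-- ===== Notes on version B (the rewrite author's own statement) =====
-- stated objective: alternative
-- what changed: Replaces A's two passes (max(parole, key=len) followed by a counting loop over the whole list) with a single loop that maintains the current first-longest word and resets/increments its count on the fly.
import Mathlib
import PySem

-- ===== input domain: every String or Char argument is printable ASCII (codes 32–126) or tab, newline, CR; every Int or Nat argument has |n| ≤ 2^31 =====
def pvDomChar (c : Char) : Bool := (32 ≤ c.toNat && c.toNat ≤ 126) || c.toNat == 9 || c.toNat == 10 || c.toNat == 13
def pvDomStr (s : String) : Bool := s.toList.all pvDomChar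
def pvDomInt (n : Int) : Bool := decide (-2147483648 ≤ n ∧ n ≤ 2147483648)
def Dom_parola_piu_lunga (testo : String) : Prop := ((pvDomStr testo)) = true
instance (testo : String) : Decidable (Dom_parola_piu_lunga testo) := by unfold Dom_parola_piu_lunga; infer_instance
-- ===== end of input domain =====

-- B replaces A's two passes (max by length, then a counting loop) with one loop keeping the
-- first-longest word and its running count; A = B whenever testo contains a word (Pre_).


-- ===== PORT A =====
-- parole = testo.split(); parola_lunga = max(parole, key=len); then a counting loop.
-- max([]) raises ValueError (max? = none); that input is excluded by Pre_.
def parola_piu_lunga (testo : String) : String × Int :=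
  let parole := PySem.Str.split₀ testo
  match PySem.List.max? parole (fun w => PySem.Str.len w) with
  | some parola_lunga =>
      (parola_lunga, parole.foldl (fun count parola => if parola_lunga = parola then count + 1 else count) 0)
  | none => ("", 0)

-- ===== PORT B =====
-- one step of B's loop: best is Option String (starts as None), paired with the count
def pplAltStep (acc : Option (String × Int)) (parola : String) : Option (String × Int) :=
  match acc with
  | none => some (parola, 1)
  | some (best, count) =>
      if PySem.Str.len best < PySem.Str.len parola then some (parola, 1)
      else if parola = best then some (best, count + 1)
      else some (best, count)

def parola_piu_lunga_alt (testo : String) : String × Int :=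
  match (PySem.Str.split₀ testo).foldl pplAltStep none with
  | some p => p
  | none => ("", 0)   -- B raises ValueError here; excluded by Pre_

-- ===== PRECONDITION & SPEC =====
-- Pre_ excludes exactly the inputs with no word, where A's max([]) raises ValueError.
def Pre_parola_piu_lunga (testo : String) : Prop := PySem.Str.split₀ testo ≠ []
instance (testo : String) : Decidable (Pre_parola_piu_lunga testo) := by unfold Pre_parola_piu_lunga; infer_instance
def pvWitness_parola_piu_lunga : String := "ciao mondo bello"

def Spec_parola_piu_lunga (testo : String) (out : String × Int) : Prop := out = parola_piu_lunga_alt testo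
instance (testo : String) (out : String × Int) : Decidable (Spec_parola_piu_lunga testo out) := by unfold Spec_parola_piu_lunga; infer_instance

-- ===== CLAIM (what is proved, stated in full; the proofs are below) =====
def Claim_equal_parola_piu_lunga : Prop := ∀ (testo : String), Dom_parola_piu_lunga testo → Pre_parola_piu_lunga testo → Spec_parola_piu_lunga testo (parola_piu_lunga testo)

-- ===== LEMMAS AND PROOFS =====

-- the running first-longest word starting from b
def pplFmax (b : String) (t : List String) : String :=
  t.foldl (fun m x => if PySem.Str.len m < PySem.Str.len x then x else m) b

-- number of occurrences of m in l
def pplCnt (m : String) : List String → Int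
  | [] => 0
  | w :: t => (if m = w then 1 else 0) + pplCnt m t

theorem pplFmax_nil (b : String) : pplFmax b [] = b := rfl

theorem pplFmax_cons (b w : String) (t : List String) :
    pplFmax b (w :: t) = pplFmax (if PySem.Str.len b < PySem.Str.len w then w else b) t := rfl

-- fmax either stays b or is strictly longer
theorem pplFmax_len (t : List String) : ∀ b, pplFmax b t = b ∨ PySem.Str.len b < PySem.Str.len (pplFmax b t) := by
  induction t with
  | nil => intro b; exact Or.inl rfl
  | cons w t ih =>
      intro b
      rw [pplFmax_cons]
      by_cases h : PySem.Str.len b < PySem.Str.len w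
      · simp only [h, if_pos]
        rcases ih w with h2 | h2
        · rw [h2]; exact Or.inr h
        · exact Or.inr (lt_trans h h2)
      · simp only [h, if_neg, not_false_iff]
        exact ih b

-- A's counting loop computes pplCnt
theorem pplCount_fold (m : String) (l : List String) : ∀ c : Int,
    l.foldl (fun count parola => if m = parola then count + 1 else count) c = c + pplCnt m l := by
  induction l with
  | nil => intro c; simp [pplCnt]
  | cons w t ih =>
      intro c
      simp only [List.foldl_cons, pplCnt]
      by_cases h : m = w
      · rw [if_pos h, ih]; simp [h]; ring
      · rw [if_neg h, ih]; simp [h]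

-- A's max(parole, key=len) on a nonempty list is the running first-longest word
theorem pplMax_fold : ∀ (t : List String) (b : String),
    PySem.List.max? (b :: t) (fun s => PySem.Str.len s) = some (pplFmax b t) := by
  intro t
  induction t with
  | nil => intro b; rfl
  | cons w t ih =>
      intro b
      have step : PySem.List.max? (b :: w :: t) (fun s => PySem.Str.len s)
          = PySem.List.max? ((if PySem.Str.len b < PySem.Str.len w then w else b) :: t) (fun s => PySem.Str.len s) := by
        simp only [PySem.List.max?, List.foldl_cons]
        congr 1
        exact (apply_ite some (PySem.Str.len b < PySem.Str.len w) w b).symm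
      rw [step, ih, pplFmax_cons]

-- key invariant for B's loop
theorem pplAlt_fold (t : List String) : ∀ (b : String) (c : Int),
    t.foldl pplAltStep (some (b, c))
      = some (pplFmax b t, (if pplFmax b t = b then c else 0) + pplCnt (pplFmax b t) t) := by
  induction t with
  | nil => intro b c; simp [pplFmax_nil, pplCnt]
  | cons w t ih =>
      intro b c
      simp only [List.foldl_cons, pplAltStep, pplFmax_cons]
      by_cases h1 : PySem.Str.len b < PySem.Str.len w
      · simp only [if_pos h1]
        rw [ih]
        have hlt : PySem.Str.len b < PySem.Str.len (pplFmax w t) := by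
          rcases pplFmax_len t w with h2 | h2
          · rw [h2]; exact h1
          · exact lt_trans h1 h2
        have hne : ¬ (pplFmax w t = b) := by
          intro he; rw [he] at hlt; exact lt_irrefl _ hlt
        rw [if_neg hne]
        by_cases h3 : pplFmax w t = w <;> simp [pplCnt, h3]
      · simp only [if_neg h1]
        by_cases h2 : w = b
        · subst h2
          rw [if_pos (rfl : w = w), ih]
          by_cases h3 : pplFmax w t = w <;> simp [pplCnt, h3]
          ring
        · simp only [if_neg h2]
          rw [ih]
          have hnw : ¬ (pplFmax b t = w) := by
            intro he
            rcases pplFmax_len t b with h3 | h3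
            · exact h2 ((h3.symm.trans he).symm)
            · rw [he] at h3; exact h1 h3
          simp [pplCnt, hnw]

-- ===== VERDICT (by name: the statement is the Claim_ definition above) =====
theorem parola_piu_lunga_spec : Claim_equal_parola_piu_lunga := by
  intro testo _ hpre
  unfold Spec_parola_piu_lunga parola_piu_lunga parola_piu_lunga_alt
  cases h : PySem.Str.split₀ testo with
  | nil => exact absurd h hpre
  | cons w t =>
      dsimp only
      rw [pplMax_fold, List.foldl_cons,
        show pplAltStep none w = some (w, 1) from rfl, pplAlt_fold]
      simp only []
      rw [pplCount_fold]
      by_cases h3 : pplFmax w t = w <;> simp [pplCnt, h3]
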